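-- pv_equiv track=rewrite | github.com/Qual21/Advent-of-Code | week 2/day9b.py | swap_files
-- ===== SOURCE A (Python) =====
-- def swap_files(clever):
--     i = len(clever) - 1
--     j = 0
--     while i >= j:
--         if clever[i] != '.':
--             while j < i and clever[j] != '.':
--                 j += 1
--             if j > i:
--                 break
--             clever[i], clever[j] = clever[j], clever[i]
--         i -= 1
--
--     return clever
-- ===== SOURCE B (Python) =====
-- def swap_files(clever):
--     gaps = [k for k, v in enumerate(clever) if v == '.']
--     files = [k for k, v in enumerate(clever) if v != '.']
--     g, f = 0, len(files) - 1
--     while g < len(gaps) and f >= 0 and gaps[g] < files[f]: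
--         gi, fi = gaps[g], files[f]
--         clever[gi], clever[fi] = clever[fi], clever[gi]
--         g += 1
--         f -= 1
--     return clever
-- ===== Notes on version B (the rewrite author's own statement) =====
-- stated objective: alternative
-- what changed: A interleaves a backward file scan with an inner forward gap scan over the mutable list; B first builds the gap-index and file-index tables in one enumerate pass and then performs a single pairing pass swapping the k-th leftmost gap with the k-th rightmost file while gap < file.
import Mathlib
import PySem

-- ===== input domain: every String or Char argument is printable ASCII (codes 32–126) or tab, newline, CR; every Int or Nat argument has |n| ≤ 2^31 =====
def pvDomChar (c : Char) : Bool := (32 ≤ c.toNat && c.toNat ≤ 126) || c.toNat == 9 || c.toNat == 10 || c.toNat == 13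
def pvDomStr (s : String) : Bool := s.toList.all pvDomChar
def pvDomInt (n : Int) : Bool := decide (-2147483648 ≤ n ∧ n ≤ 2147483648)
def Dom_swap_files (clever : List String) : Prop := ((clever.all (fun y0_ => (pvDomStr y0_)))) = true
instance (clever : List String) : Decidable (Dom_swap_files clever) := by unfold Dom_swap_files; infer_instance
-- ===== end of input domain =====

-- B replaces A's interleaved two-pointer scan by precomputed gap/file index tables and a single
-- pairing pass (objective: alternative decomposition). Both A and B mutate `clever` in place in
-- Python and return it; the Lean theorem is about the returned value (= the final list contents).

-- ===== PORT A =====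
-- clever[k] for an index that is always in range during the loops (0 ≤ j ≤ k ≤ i < len)
def pvGetS (xs : List String) (k : Int) : String := (PySem.List.pyGet? xs k).getD ""

-- clever[i], clever[j] = clever[j], clever[i]  (both reads before both writes; indices in range)
def pvSwapA (xs : List String) (i j : Int) : List String :=
  (xs.set i.toNat (pvGetS xs j)).set j.toNat (pvGetS xs i)

-- inner `while j < i and clever[j] != '.': j += 1`
def pvAdvanceJ (xs : List String) (i j : Int) : Int :=
  if j < i ∧ pvGetS xs j ≠ "." then pvAdvanceJ xs i (j + 1) else j
termination_by (i - j).toNat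
decreasing_by omega

theorem pvAdvanceJ_ge (xs : List String) (i j : Int) : j ≤ pvAdvanceJ xs i j := by
  induction j using pvAdvanceJ.induct xs i with
  | case1 j h ih => rw [pvAdvanceJ, if_pos h]; omega
  | case2 j h => rw [pvAdvanceJ, if_neg h]

-- outer `while i >= j: …`
def pvLoopA (xs : List String) (i j : Int) : List String :=
  if h : j ≤ i then
    if pvGetS xs i ≠ "." then
      let j' := pvAdvanceJ xs i j
      if i < j' then xs            -- `if j > i: break` (then return clever)
      else pvLoopA (pvSwapA xs i j') (i - 1) j'
    else pvLoopA xs (i - 1) j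
  else xs
termination_by (i + 1 - j).toNat
decreasing_by
  · have h1 := pvAdvanceJ_ge xs i j
    omega
  · omega

def swap_files (clever : List String) : List String :=
  pvLoopA clever (PySem.List.len clever - 1) 0

-- ===== PORT B =====
-- [k for k, v in enumerate(clever) if p(v)]  (k starts at s)
def pvIdxs (p : String → Bool) (xs : List String) (s : Nat) : List Nat :=
  match xs with
  | [] => []
  | x :: t => if p x then s :: pvIdxs p t (s + 1) else pvIdxs p t (s + 1)

-- clever[gi], clever[fi] = clever[fi], clever[gi]
def pvSwapB (xs : List String) (gi fi : Nat) : List String :=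
  (xs.set gi (xs.getD fi "")).set fi (xs.getD gi "")

-- the pairing `while` loop: gs = gaps[g:], fs = files[:f+1] reversed (the two pointers as lists)
def pvPair (xs : List String) : List Nat → List Nat → List String
  | g :: gs, f :: fs => if g < f then pvPair (pvSwapB xs g f) gs fs else xs
  | _, _ => xs

def swap_files_alt (clever : List String) : List String :=
  pvPair clever (pvIdxs (fun v => v = ".") clever 0)
    ((pvIdxs (fun v => ¬ v = ".") clever 0).reverse)

-- ===== PRECONDITION & SPEC =====
def Spec_swap_files (clever : List String) (out : List String) : Prop := out = swap_files_alt clever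
instance (clever : List String) (out : List String) : Decidable (Spec_swap_files clever out) := by unfold Spec_swap_files; infer_instance

-- ===== CLAIM (what is proved, stated in full; the proofs are below) =====
def Claim_equal_swap_files : Prop := ∀ (clever : List String), Dom_swap_files clever → Spec_swap_files clever (swap_files clever)

-- ===== LEMMAS AND PROOFS =====

theorem pvAdvanceJ_le (xs : List String) (i j : Int) (h0 : j ≤ i) : pvAdvanceJ xs i j ≤ i := by
  induction j using pvAdvanceJ.induct xs i with
  | case1 j h ih => rw [pvAdvanceJ, if_pos h]; exact ih (by omega)
  | case2 j h => rw [pvAdvanceJ, if_neg h]; omega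

-- pvGetS at a nonnegative index is List.getD at the corresponding Nat index
theorem pv_getS_eq (xs : List String) (k : Int) (h : 0 ≤ k) :
    pvGetS xs k = xs.getD k.toNat "" := by
  rw [pvGetS, PySem.List.pyGet?_of_nonneg xs h]; rfl

theorem pv_getD_set_self (xs : List String) (m : Nat) (a d : String) (h : m < xs.length) :
    (xs.set m a).getD m d = a := by
  simp [List.getD, h]

theorem pv_getD_set_ne (xs : List String) (m k : Nat) (a d : String) (h : k ≠ m) :
    (xs.set m a).getD k d = xs.getD k d := by
  simp [List.getD, List.getElem?_set_ne h.symm]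

-- the inner while scans over non-gap cells only
theorem pvAdvanceJ_no_gap (xs : List String) (i j : Int) :
    ∀ k : Int, j ≤ k → k < pvAdvanceJ xs i j → pvGetS xs k ≠ "." := by
  induction j using pvAdvanceJ.induct xs i with
  | case1 j h ih =>
    intro k hk1 hk2
    rw [pvAdvanceJ, if_pos h] at hk2
    rcases eq_or_lt_of_le hk1 with rfl | hlt
    · exact h.2
    · exact ih k (by omega) hk2
  | case2 j h =>
    intro k hk1 hk2
    rw [pvAdvanceJ, if_neg h] at hk2
    omega

-- where the inner while stops
theorem pvAdvanceJ_stop (xs : List String) (i j : Int) (h0 : j ≤ i) :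
    pvAdvanceJ xs i j = i ∨ pvGetS xs (pvAdvanceJ xs i j) = "." := by
  induction j using pvAdvanceJ.induct xs i with
  | case1 j h ih =>
    rw [pvAdvanceJ, if_pos h]
    exact ih (by omega)
  | case2 j h =>
    rw [pvAdvanceJ, if_neg h]
    by_cases hji : j < i
    · right
      by_contra hne
      exact h ⟨hji, hne⟩
    · left; omega

-- membership in the index-comprehension
theorem pvIdxs_mem (p : String → Bool) (xs : List String) (s k : Nat) :
    k ∈ pvIdxs p xs s ↔ ∃ m : Nat, ∃ h : m < xs.length, k = s + m ∧ p xs[m] = true := by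
  induction xs generalizing s with
  | nil => simp [pvIdxs]
  | cons x t ih =>
    rw [pvIdxs]
    by_cases hp : p x
    · rw [if_pos hp]
      constructor
      · intro hmem
        rcases List.mem_cons.mp hmem with rfl | hmem
        · exact ⟨0, by simp, by simp, by simpa using hp⟩
        · obtain ⟨m, hm, rfl, hpm⟩ := (ih (s + 1)).mp hmem
          exact ⟨m + 1, by simpa using hm, by omega, by simpa using hpm⟩
      · rintro ⟨m, hm, rfl, hpm⟩
        cases m with
        | zero => simp
        | succ m =>
          refine List.mem_cons_of_mem _ ((ih (s + 1)).mpr ⟨m, by simpa using hm, by omega, by simpa using hpm⟩)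
    · rw [if_neg hp]
      rw [ih (s + 1)]
      constructor
      · rintro ⟨m, hm, rfl, hpm⟩
        exact ⟨m + 1, by simpa using hm, by omega, by simpa using hpm⟩
      · rintro ⟨m, hm, rfl, hpm⟩
        cases m with
        | zero => exact absurd (by simpa using hpm) hp
        | succ m => exact ⟨m, by simpa using hm, by omega, by simpa using hpm⟩

theorem pvIdxs_pairwise (p : String → Bool) (xs : List String) (s : Nat) :
    (pvIdxs p xs s).Pairwise (· < ·) := by
  induction xs generalizing s with
  | nil => exact List.Pairwise.nil
  | cons x t ih =>
    rw [pvIdxs]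
    by_cases hp : p x
    · rw [if_pos hp]
      refine List.Pairwise.cons ?_ (ih (s + 1))
      intro y hy
      obtain ⟨m, hm, rfl, -⟩ := (pvIdxs_mem p t (s + 1) y).mp hy
      omega
    · rw [if_neg hp]; exact ih (s + 1)

-- the pairing loop does nothing when no gap index is below a file index
theorem pvPair_stop (xs : List String) (G F : List Nat)
    (h : ∀ g ∈ G, ∀ f ∈ F, ¬ g < f) : pvPair xs G F = xs := by
  cases G with
  | nil => rfl
  | cons g gs =>
    cases F with
    | nil => rfl
    | cons f fs =>
      rw [pvPair, if_neg (h g (List.mem_cons_self) f (List.mem_cons_self))]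

-- SIMULATION: A's outer-loop state (xs, i, j) against B's pairing loop on the remaining
-- gap indices G and remaining file indices F (descending).
theorem pv_sim : ∀ (n : Nat) (xs : List String) (i j : Int) (G F : List Nat),
    (i + 1 - j).toNat ≤ n →
    0 ≤ j →
    i < (xs.length : Int) →
    (∀ k : Nat, (k : Int) < j → xs.getD k "" ≠ ".") →
    (∀ g ∈ G, g < xs.length ∧ xs.getD g "" = ".") →
    (∀ k : Nat, (k : Int) ≤ i → xs.getD k "" = "." → k ∈ G) →
    G.Pairwise (· < ·) →
    F.Pairwise (· > ·) →
    (∀ f ∈ F, (f : Int) ≤ i ∧ xs.getD f "" ≠ ".") →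
    (∀ k : Nat, j < (k : Int) → (k : Int) ≤ i → xs.getD k "" ≠ "." → k ∈ F) →
    pvLoopA xs i j = pvPair xs G F := by
  intro n
  induction n with
  | zero =>
    intro xs i j G F hn h0 hlen hpre hGs hGc hGp hFp hFs hFc
    have hij : i < j := by omega
    rw [pvLoopA, dif_neg (by omega)]
    refine (pvPair_stop xs G F ?_).symm
    intro g hg f hf hlt
    obtain ⟨-, hgap⟩ := hGs g hg
    obtain ⟨hfle, -⟩ := hFs f hf
    exact hpre g (by omega) hgap
  | succ n ih =>
    intro xs i j G F hn h0 hlen hpre hGs hGc hGp hFp hFs hFc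
    rw [pvLoopA]
    by_cases hj : j ≤ i
    · rw [dif_pos hj]
      have hitn : (i.toNat : Int) = i := by omega
      have hgs_i : pvGetS xs i = xs.getD i.toNat "" := pv_getS_eq xs i (by omega)
      by_cases hdot : pvGetS xs i = "."
      · -- clever[i] == '.', skip
        rw [if_neg (not_not_intro hdot)]
        rw [hgs_i] at hdot
        refine ih xs (i - 1) j G F (by omega) h0 (by omega) hpre hGs
          (fun k hk hgap => hGc k (by omega) hgap) hGp hFp ?_
          (fun k hk1 hk2 hne => hFc k hk1 (by omega) hne)
        intro f hf
        obtain ⟨h1, h2⟩ := hFs f hf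
        have hfne : f ≠ i.toNat := fun e => h2 (by rw [e]; exact hdot)
        exact ⟨by omega, h2⟩
      · -- clever[i] != '.'
        rw [if_pos hdot]
        have hge := pvAdvanceJ_ge xs i j
        have hle := pvAdvanceJ_le xs i j hj
        rw [if_neg (by omega : ¬ i < pvAdvanceJ xs i j)]
        have hnogap := pvAdvanceJ_no_gap xs i j
        have hstop := pvAdvanceJ_stop xs i j hj
        set j' := pvAdvanceJ xs i j with hj'def
        rcases hstop with heq | hgap
        · -- inner loop ran into i: everything left of i is a file; terminal
          rw [heq]
          have hilen : i.toNat < xs.length := by omega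
          have hswap : pvSwapA xs i i = xs := by
            rw [pvSwapA, pv_getS_eq xs i (by omega), List.getD_eq_getElem xs "" hilen,
              List.set_getElem_self, List.set_getElem_self]
          rw [hswap, pvLoopA, dif_neg (by omega)]
          refine (pvPair_stop xs G F ?_).symm
          intro g hg f hf hlt
          obtain ⟨-, hgap⟩ := hGs g hg
          obtain ⟨hfle, -⟩ := hFs f hf
          by_cases hgj : (g : Int) < j
          · exact hpre g hgj hgap
          · exact hnogap g (by omega) (by omega) ((pv_getS_eq xs g (by omega)).symm ▸ hgap)
        · -- clever[j'] == '.', a real swap with j' < i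
          have hj'i : j' < i := by
            rcases lt_or_eq_of_le hle with h | h
            · exact h
            · exact absurd (h ▸ hgap) hdot
          have hj'tn : (j'.toNat : Int) = j' := by omega
          have hgapD : xs.getD j'.toNat "" = "." := by
            rw [← pv_getS_eq xs j' (by omega)]; exact hgap
          have hfileD : xs.getD i.toNat "" ≠ "." := by rw [← hgs_i]; exact hdot
          -- G = j'.toNat :: Gt
          have hminG : ∀ g ∈ G, j'.toNat ≤ g := by
            intro g hg
            by_contra hc
            obtain ⟨-, hg2⟩ := hGs g hg
            by_cases hgj : (g : Int) < j
            · exact hpre g hgj hg2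
            · exact hnogap g (by omega) (by omega) ((pv_getS_eq xs g (by omega)).symm ▸ hg2)
          have hmemG : j'.toNat ∈ G := hGc j'.toNat (by omega) hgapD
          cases G with
          | nil => exact absurd hmemG (List.not_mem_nil)
          | cons g0 Gt =>
            have hg0 : g0 = j'.toNat := by
              rcases List.mem_cons.mp hmemG with h | h
              · omega
              · have := (List.pairwise_cons.mp hGp).1 _ h
                have := hminG g0 (List.mem_cons_self)
                omega
            subst hg0
            -- F = i.toNat :: Ft
            have hmemF : i.toNat ∈ F := hFc i.toNat (by omega) (by omega) hfileD
            cases F with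
            | nil => exact absurd hmemF (List.not_mem_nil)
            | cons f0 Ft =>
              have hf0 : f0 = i.toNat := by
                rcases List.mem_cons.mp hmemF with h | h
                · omega
                · have := (List.pairwise_cons.mp hFp).1 _ h
                  have := (hFs f0 (List.mem_cons_self)).1
                  omega
              subst hf0
              rw [pvPair, if_pos (show j'.toNat < i.toNat by omega)]
              have hne : j'.toNat ≠ i.toNat := by omega
              have hswap : pvSwapA xs i j' = pvSwapB xs j'.toNat i.toNat := by
                rw [pvSwapA, pvSwapB, pv_getS_eq xs j' (by omega), pv_getS_eq xs i (by omega),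
                  List.set_comm _ _ hne.symm]
              rw [hswap]
              -- facts about the swapped list
              set ys := pvSwapB xs j'.toNat i.toNat with hysdef
              have hyslen : ys.length = xs.length := by simp [hysdef, pvSwapB]
              have hEi : ys.getD i.toNat "" = "." := by
                rw [hysdef, pvSwapB, pv_getD_set_self _ _ _ _ (by simpa using (by omega : i.toNat < xs.length)), hgapD]
              have hEj : ys.getD j'.toNat "" = xs.getD i.toNat "" := by
                rw [hysdef, pvSwapB, pv_getD_set_ne _ _ _ _ _ hne,
                  pv_getD_set_self _ _ _ _ (by omega)]
              have hEo : ∀ k : Nat, k ≠ i.toNat → k ≠ j'.toNat → ys.getD k "" = xs.getD k "" := by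
                intro k hk1 hk2
                rw [hysdef, pvSwapB, pv_getD_set_ne _ _ _ _ _ hk1, pv_getD_set_ne _ _ _ _ _ hk2]
              have hGt := List.pairwise_cons.mp hGp
              have hFt := List.pairwise_cons.mp hFp
              refine ih ys (i - 1) j' Gt Ft (by omega) (by omega) (by omega) ?_ ?_ ?_ hGt.2 hFt.2 ?_ ?_
              · -- prefix of ys below j' holds files
                intro k hk
                rw [hEo k (by omega) (by omega)]
                by_cases hkj : (k : Int) < j
                · exact hpre k hkj
                · intro hgap2
                  exact hnogap k (by omega) (by omega) ((pv_getS_eq xs k (by omega)).symm ▸ hgap2)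
              · -- Gt sound for ys
                intro g hg
                have hgj' : j'.toNat < g := hGt.1 g hg
                obtain ⟨h1, h2⟩ := hGs g (List.mem_cons_of_mem _ hg)
                have hgi : g ≠ i.toNat := fun e => hfileD (e ▸ h2)
                exact ⟨by omega, by rw [hEo g hgi (by omega)]; exact h2⟩
              · -- Gt complete for ys below i-1
                intro k hk hgap2
                have hki : k ≠ i.toNat := by omega
                by_cases hkj : k = j'.toNat
                · rw [hkj, hEj] at hgap2; exact absurd hgap2 hfileD
                · rw [hEo k hki hkj] at hgap2
                  have := hGc k (by omega) hgap2
                  rcases List.mem_cons.mp this with h | h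
                  · exact absurd h hkj
                  · exact h
              · -- Ft sound for ys
                intro f hf
                have hfi : f < i.toNat := hFt.1 f hf
                obtain ⟨h1, h2⟩ := hFs f (List.mem_cons_of_mem _ hf)
                refine ⟨by omega, ?_⟩
                by_cases hfj : f = j'.toNat
                · rw [hfj, hEj]; exact hfileD
                · rw [hEo f (by omega) hfj]; exact h2
              · -- Ft complete for ys above j'
                intro k hk1 hk2 hne2
                have hki : k ≠ i.toNat := by omega
                have hkj : k ≠ j'.toNat := by omega
                rw [hEo k hki hkj] at hne2
                have := hFc k (by omega) (by omega) hne2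
                rcases List.mem_cons.mp this with h | h
                · exact absurd h hki
                · exact h
    · rw [dif_neg hj]
      refine (pvPair_stop xs G F ?_).symm
      intro g hg f hf hlt
      obtain ⟨-, hgap⟩ := hGs g hg
      obtain ⟨hfle, -⟩ := hFs f hf
      exact hpre g (by omega) hgap

-- ===== VERDICT (by name: the statement is the Claim_ definition above) =====
theorem swap_files_spec : Claim_equal_swap_files := by
  intro clever _
  unfold Spec_swap_files swap_files swap_files_alt
  rw [PySem.List.len_eq]
  refine pv_sim clever.length clever ((clever.length : Int) - 1) 0 _ _
    (by omega) (by omega) (by omega) (by omega) ?_ ?_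
    (pvIdxs_pairwise _ clever 0) ?_ ?_ ?_
  · -- gaps sound
    intro g hg
    obtain ⟨m, hm, rfl, hp⟩ := (pvIdxs_mem _ clever 0 g).mp hg
    simp only [decide_eq_true_eq] at hp
    exact ⟨by omega, by rw [List.getD_eq_getElem clever "" (by omega)]; simpa using hp⟩
  · -- gaps complete
    intro k hk hgap
    have hklen : k < clever.length := by omega
    refine (pvIdxs_mem _ clever 0 k).mpr ⟨k, hklen, by omega, ?_⟩
    rw [List.getD_eq_getElem clever "" hklen] at hgap
    simpa using hgap
  · -- files descending
    exact List.pairwise_reverse.mpr (by simpa using pvIdxs_pairwise _ clever 0)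
  · -- files sound
    intro f hf
    rw [List.mem_reverse] at hf
    obtain ⟨m, hm, rfl, hp⟩ := (pvIdxs_mem _ clever 0 f).mp hf
    simp only [decide_eq_true_eq] at hp
    exact ⟨by omega, by rw [List.getD_eq_getElem clever "" (by omega)]; simpa using hp⟩
  · -- files complete
    intro k hk1 hk2 hne
    have hklen : k < clever.length := by omega
    rw [List.mem_reverse]
    refine (pvIdxs_mem _ clever 0 k).mpr ⟨k, hklen, by omega, ?_⟩
    rw [List.getD_eq_getElem clever "" hklen] at hne
    simpa using hne
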